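-- pv_equiv track=rewrite | github.com/jacobphillips99/open-rubric | verifiers/rubrics/multistep/utils.py | topological_levels
-- ===== SOURCE A (Python) =====
-- from collections import defaultdict
-- from typing import Dict, List
--
-- def topological_levels(graph: Dict[str, List[str]]) -> List[List[str]]:
--     """
--     Topological levels of a graph. Based on the idea that {a: [b, c]} means "a enables b and c".
--     Work should be done in the order [[a], [b, c]].
--
--     Args:
--         graph: A dictionary mapping nodes to their dependencies.
--
--     Returns:
--         A list of lists, where each inner list represents a level of the graph.
--     """
--     graph = {k: (v if v is not None else []) for k, v in graph.items()}
--
--     # build in-degree (how many prerequisites each node has)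
--     in_degree = defaultdict(int)
--     children = defaultdict(list)
--
--     for parent, unlocks in graph.items():
--         for child in unlocks:
--             in_degree[child] += 1
--             children[parent].append(child)
--         in_degree[parent] += 0  # ensure key exists
--
--     # start with nodes that have no prerequisites
--     layer = [node for node in graph if in_degree[node] == 0]
--     result = []
--
--     while layer:
--         result.append(sorted(layer))
--         next_layer = []
--         for node in layer:
--             for child in children[node]:
--                 in_degree[child] -= 1
--                 if in_degree[child] == 0:
--                     next_layer.append(child)
--         layer = next_layer
--     return result
-- ===== SOURCE B (Python) =====
-- def topological_levels(graph):
--     """Counter-free re-implementation: reverse-map + repeated peeling of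
--     fully-unlocked nodes; each round is the sorted set of nodes whose
--     parents are all already done."""
--     graph = {k: (v if v is not None else []) for k, v in graph.items()}
--     parents = {}
--     for p, unlocks in graph.items():
--         parents.setdefault(p, [])
--         for c in unlocks:
--             parents.setdefault(c, []).append(p)
--     done = set()
--     result = []
--     while True:
--         ready = sorted(n for n, ps in parents.items()
--                        if n not in done and all(q in done for q in ps))
--         if not ready:
--             return result
--         result.append(ready)
--         done.update(ready)
-- ===== Notes on version B (the rewrite author's own statement) =====
-- stated objective: alternative
-- what changed: Replaces Kahn's in-degree counters and per-node adjacency decrements with a counter-free peeling loop over a reverse-dependency map: each round collects (sorted) every not-yet-done node all of whose parents are done, so cyclic nodes are never collected.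
import Mathlib
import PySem

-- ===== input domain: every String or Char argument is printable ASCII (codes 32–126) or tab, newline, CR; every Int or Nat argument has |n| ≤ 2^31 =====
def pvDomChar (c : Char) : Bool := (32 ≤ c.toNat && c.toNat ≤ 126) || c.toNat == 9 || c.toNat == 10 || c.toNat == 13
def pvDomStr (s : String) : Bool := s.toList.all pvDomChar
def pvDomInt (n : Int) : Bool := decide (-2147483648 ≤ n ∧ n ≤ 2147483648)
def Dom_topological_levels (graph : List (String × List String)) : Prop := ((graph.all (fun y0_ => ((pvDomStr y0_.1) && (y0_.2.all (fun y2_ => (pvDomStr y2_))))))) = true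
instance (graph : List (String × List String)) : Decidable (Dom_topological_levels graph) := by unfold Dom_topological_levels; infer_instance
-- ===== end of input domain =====

-- B replaces A's Kahn in-degree counting by a counter-free peeling loop over a reverse-dependency
-- map (objective: alternative algorithm of similar cost); return values agree on every input.

-- ===== PORT A =====
-- in_degree[child] -= 1; if in_degree[child] == 0: next_layer.append(child)
def tlDecStep (st : PySem.Dict String Int × List String) (c : String) :
    PySem.Dict String Int × List String :=
  let ind := st.1.modify c 0 (· - 1)
  (ind, if ind.getD c 0 == 0 then st.2 ++ [c] else st.2)

-- the two defaultdict-building loops of A (in_degree, children)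
def tlBuildA (g : List (String × List String)) :
    PySem.Dict String Int × PySem.Dict String (List String) :=
  g.foldl (fun st pu =>
    let st1 := pu.2.foldl
      (fun (st : PySem.Dict String Int × PySem.Dict String (List String)) c =>
        (st.1.modify c 0 (· + 1), st.2.modify pu.1 [] (· ++ [c]))) st
    (st1.1.modify pu.1 0 (· + 0), st1.2)) (PySem.Dict.empty, PySem.Dict.empty)

-- A's while-loop; fuel is an upper bound on the iteration count (proved sufficient below)
def tlLoopA (fuel : Nat) (children : PySem.Dict String (List String))
    (ind : PySem.Dict String Int) (layer : List String) (acc : List (List String)) :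
    List (List String) :=
  match fuel with
  | 0 => acc
  | Nat.succ fuel =>
    if layer.isEmpty then acc
    else
      let st := layer.foldl (fun st node => (children.getD node []).foldl tlDecStep st) (ind, [])
      tlLoopA fuel children st.1 st.2 (acc ++ [PySem.List.sorted layer (fun x => x) false])

def topological_levels (graph : List (String × List String)) : List (List String) :=
  let g := (PySem.Dict.ofList graph).items
  let built := tlBuildA g
  let layer := (g.map (·.1)).filter (fun n => built.1.getD n 0 == 0)
  tlLoopA ((g.flatMap (fun pu => pu.1 :: pu.2)).length + 1) built.2 built.1 layer []

-- ===== PORT B =====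
-- parents.setdefault(p, []); parents.setdefault(c, []).append(p)
def tlParentsDict (g : List (String × List String)) : PySem.Dict String (List String) :=
  g.foldl (fun d pu =>
    pu.2.foldl (fun d c => d.modify c [] (· ++ [pu.1])) (d.setdefault pu.1 [])) PySem.Dict.empty

-- B's while-loop; fuel is an upper bound on the iteration count (proved sufficient below)
def tlLoopB (fuel : Nat) (pitems : List (String × List String)) (done : PySem.Set String)
    (acc : List (List String)) : List (List String) :=
  match fuel with
  | 0 => acc
  | Nat.succ fuel =>
    let ready := PySem.List.sorted
      ((pitems.filter (fun np =>
          !(PySem.Set.contains done np.1) && np.2.all (fun q => PySem.Set.contains done q))).map (·.1))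
      (fun x => x) false
    if ready.isEmpty then acc
    else tlLoopB fuel pitems (PySem.Set.update done ready) (acc ++ [ready])

def topological_levels_alt (graph : List (String × List String)) : List (List String) :=
  let g := (PySem.Dict.ofList graph).items
  let parents := tlParentsDict g
  tlLoopB (parents.size + 1) parents.items PySem.Set.empty []

-- ===== PRECONDITION & SPEC =====
def Spec_topological_levels (graph : List (String × List String)) (out : List (List String)) : Prop := out = topological_levels_alt graph
instance (graph : List (String × List String)) (out : List (List String)) : Decidable (Spec_topological_levels graph out) := by unfold Spec_topological_levels; infer_instance

-- ===== CLAIM (what is proved, stated in full; the proofs are below) =====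
def Claim_equal_topological_levels : Prop := ∀ (graph : List (String × List String)), Dom_topological_levels graph → Spec_topological_levels graph (topological_levels graph)

-- ===== LEMMAS AND PROOFS =====

-- edge list (parent, child) with multiplicity, in iteration order
def tlE (g : List (String × List String)) : List (String × String) :=
  g.flatMap (fun pu => pu.2.map (fun c => (pu.1, c)))

-- all mentioned nodes, in first-mention order
def tlFlat (g : List (String × List String)) : List String :=
  g.flatMap (fun pu => pu.1 :: pu.2)

theorem tlCountP_congr {α : Type} (l : List α) (p q : α → Bool)
    (h : ∀ a ∈ l, p a = q a) : l.countP p = l.countP q := by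
  induction l with
  | nil => rfl
  | cons x xs ih =>
    simp [List.countP_cons, h x (by simp), ih (fun a ha => h a (by simp [ha]))]
theorem tlCountP_split {α : Type} (l : List α) (p q : α → Bool) :
    l.countP p = l.countP (fun a => p a && q a) + l.countP (fun a => p a && !q a) := by
  induction l with
  | nil => rfl
  | cons x xs ih => by_cases hp : p x <;> by_cases hq : q x <;> simp [hp, hq, ih] <;> omega

theorem tlCountP_eq_imp {α : Type} (l : List α) (p q : α → Bool)
    (hmono : ∀ a ∈ l, p a → q a) (heq : l.countP q = l.countP p) :
    ∀ a ∈ l, q a → p a := by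
  have hsplit := tlCountP_split l q p
  have hqp : l.countP (fun a => q a && p a) = l.countP p := by
    apply tlCountP_congr
    intro a ha
    cases hp : p a
    · simp [hp]
    · simp [hp, hmono a ha hp]
  have h0 : l.countP (fun a => q a && !p a) = 0 := by omega
  intro a ha hqa
  have := List.countP_eq_zero.mp h0 a ha
  simp [hqa] at this
  exact this

theorem tlLength_le_of_nodup_subset (l1 l2 : List String) (h1 : l1.Nodup) (h : l1 ⊆ l2) :
    l1.length ≤ l2.length := by
  classical
  calc l1.length = l1.toFinset.card := (List.toFinset_card_of_nodup h1).symm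
    _ ≤ l2.toFinset.card := Finset.card_le_card (by intro a ha; simp at ha ⊢; exact h ha)
    _ ≤ l2.length := l2.toFinset_card_le

theorem tlGetD_setdefault (d : PySem.Dict String (List String)) (k n : String) :
    (d.setdefault k []).getD n [] = d.getD n [] := by
  by_cases h : n = k
  · subst h; rw [PySem.Dict.getD_setdefault_self]
  · rw [PySem.Dict.getD_eq_get?_getD, PySem.Dict.get?_setdefault_of_ne _ _ h,
      ← PySem.Dict.getD_eq_get?_getD]

theorem tlBuildA_gen (g : List (String × List String)) :
    ∀ (d1 : PySem.Dict String Int) (d2 : PySem.Dict String (List String)),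
    (∀ c, (g.foldl (fun st pu =>
      let st1 := pu.2.foldl
        (fun (st : PySem.Dict String Int × PySem.Dict String (List String)) c =>
          (st.1.modify c 0 (· + 1), st.2.modify pu.1 [] (· ++ [c]))) st
      (st1.1.modify pu.1 0 (· + 0), st1.2)) (d1, d2)).1.getD c 0
        = d1.getD c 0 + ((tlE g).countP (fun e => e.2 == c) : Int)) ∧
    (∀ p, (g.foldl (fun st pu =>
      let st1 := pu.2.foldl
        (fun (st : PySem.Dict String Int × PySem.Dict String (List String)) c =>
          (st.1.modify c 0 (· + 1), st.2.modify pu.1 [] (· ++ [c]))) st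
      (st1.1.modify pu.1 0 (· + 0), st1.2)) (d1, d2)).2.getD p []
        = d2.getD p [] ++ ((tlE g).filter (fun e => e.1 == p)).map (·.2)) := by
  induction g with
  | nil => intro d1 d2; simp [tlE]
  | cons pu g ih =>
    intro d1 d2
    rw [List.foldl_cons]
    have hsplit : (pu.2.foldl
        (fun (st : PySem.Dict String Int × PySem.Dict String (List String)) c =>
          (st.1.modify c 0 (· + 1), st.2.modify pu.1 [] (· ++ [c]))) (d1, d2))
        = (pu.2.foldl (fun d c => d.modify c 0 (· + 1)) d1,
           pu.2.foldl (fun d c => d.modify pu.1 [] (· ++ [c])) d2) :=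
      PySem.List.foldl_prod_mk (fun d c => d.modify c 0 (· + 1))
        (fun d c => d.modify pu.1 [] (· ++ [c])) pu.2 d1 d2
    simp only [hsplit]
    obtain ⟨ih1, ih2⟩ := ih ((pu.2.foldl (fun d c => d.modify c 0 (· + 1)) d1).modify pu.1 0 (· + 0))
        (pu.2.foldl (fun d c => d.modify pu.1 [] (· ++ [c])) d2)
    constructor
    · intro c
      rw [ih1 c]
      have h1 : ((pu.2.foldl (fun d c => d.modify c 0 (· + 1)) d1).modify pu.1 0 (· + 0)).getD c 0
          = (pu.2.foldl (fun d c => d.modify c 0 (· + 1)) d1).getD c 0 := by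
        rw [PySem.Dict.getD_modify]; split <;> simp_all
      rw [h1, PySem.Dict.getD_foldl_modify_add_one]
      have h2 : (tlE (pu :: g)).countP (fun e => e.2 == c)
          = pu.2.count c + (tlE g).countP (fun e => e.2 == c) := by
        simp [tlE, List.flatMap_cons, List.countP_append, List.countP_map, Function.comp_def,
          List.count]
      rw [h2]; push_cast; ring
    · intro p
      rw [ih2 p]
      have hmap : pu.2.foldl (fun d c => d.modify pu.1 [] (· ++ [c])) d2
          = (pu.2.map (fun c => (pu.1, c))).foldl (fun d q => d.modify q.1 [] (· ++ [q.2])) d2 := by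
        rw [List.foldl_map]
      rw [hmap, PySem.Dict.getD_foldl_modify_append]
      simp [tlE, List.flatMap_cons, List.filter_append, List.map_append]

theorem tlBuildA_ind (g : List (String × List String)) (c : String) :
    (tlBuildA g).1.getD c 0 = ((tlE g).countP (fun e => e.2 == c) : Int) := by
  have h := (tlBuildA_gen g PySem.Dict.empty PySem.Dict.empty).1 c
  simpa [tlBuildA, PySem.Dict.getD_empty] using h

theorem tlBuildA_children (g : List (String × List String)) (p : String) :
    (tlBuildA g).2.getD p [] = ((tlE g).filter (fun e => e.1 == p)).map (·.2) := by
  have h := (tlBuildA_gen g PySem.Dict.empty PySem.Dict.empty).2 p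
  simpa [tlBuildA, PySem.Dict.getD_empty] using h

theorem tlParents_gen (g : List (String × List String)) :
    ∀ (d : PySem.Dict String (List String)),
    (∀ n, (g.foldl (fun d pu =>
        pu.2.foldl (fun d c => d.modify c [] (· ++ [pu.1])) (d.setdefault pu.1 [])) d).getD n []
      = d.getD n [] ++ ((tlE g).filter (fun e => e.2 == n)).map (·.1)) ∧
    ((g.foldl (fun d pu =>
        pu.2.foldl (fun d c => d.modify c [] (· ++ [pu.1])) (d.setdefault pu.1 [])) d).keys
      = PySem.Set.update d.keys (tlFlat g)) := by
  induction g with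
  | nil => intro d; simp [tlE, tlFlat, PySem.Set.update]
  | cons pu g ih =>
    intro d
    rw [List.foldl_cons]
    obtain ⟨ih1, ih2⟩ := ih (pu.2.foldl (fun d c => d.modify c [] (· ++ [pu.1])) (d.setdefault pu.1 []))
    constructor
    · intro n
      rw [ih1 n]
      have hmap : pu.2.foldl (fun d c => d.modify c [] (· ++ [pu.1])) (d.setdefault pu.1 [])
          = (pu.2.map (fun c => (c, pu.1))).foldl (fun d q => d.modify q.1 [] (· ++ [q.2]))
              (d.setdefault pu.1 []) := by
        rw [List.foldl_map]
      rw [hmap, PySem.Dict.getD_foldl_modify_append, tlGetD_setdefault]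
      have h1 : ((pu.2.map (fun c => (c, pu.1))).filter (fun q => q.1 == n)).map (·.2)
          = (((pu.2.map (fun c => (pu.1, c))).filter (fun e => e.2 == n)).map (·.1)) := by
        simp [List.filter_map, Function.comp_def, List.map_map]
      rw [h1]
      simp [tlE, List.flatMap_cons, List.filter_append, List.map_append]
    · rw [ih2]
      have hk : (pu.2.foldl (fun d c => d.modify c [] (· ++ [pu.1])) (d.setdefault pu.1 [])).keys
          = PySem.Set.update (d.setdefault pu.1 []).keys pu.2 :=
        PySem.Dict.keys_foldl_modify pu.2 [] (fun _ _ => (· ++ [pu.1])) _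
      rw [hk, PySem.Dict.keys_setdefault]
      have h2 : (if d.contains pu.1 = true then d.keys else d.keys ++ [pu.1])
          = PySem.Set.add d.keys pu.1 := by
        rw [PySem.Set.add_eq_ite]
        congr 1
        simp [PySem.Dict.contains_iff_mem_keys]
      rw [h2]
      have h3 : tlFlat (pu :: g) = (pu.1 :: pu.2) ++ tlFlat g := by simp [tlFlat]
      rw [h3, PySem.Set.update_append, PySem.Set.update_cons]

theorem tlParents_getD (g : List (String × List String)) (n : String) :
    (tlParentsDict g).getD n [] = ((tlE g).filter (fun e => e.2 == n)).map (·.1) := by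
  have h := (tlParents_gen g PySem.Dict.empty).1 n
  simpa [tlParentsDict, PySem.Dict.getD_empty] using h

theorem tlParents_keys (g : List (String × List String)) :
    (tlParentsDict g).keys = PySem.Set.ofList (tlFlat g) := by
  have h := (tlParents_gen g PySem.Dict.empty).2
  simpa [tlParentsDict, PySem.Dict.keys_empty, PySem.Set.update_nil_left] using h

theorem tlDecFold (cs : List String) : ∀ (ind : PySem.Dict String Int) (nl : List String),
    (∀ c, (cs.count c : Int) ≤ ind.getD c 0) →
    nl.Nodup →
    (∀ c ∈ nl, ¬(0 < cs.count c ∧ (cs.count c : Int) = ind.getD c 0)) →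
    (∀ c, (cs.foldl tlDecStep (ind, nl)).1.getD c 0 = ind.getD c 0 - cs.count c) ∧
    (cs.foldl tlDecStep (ind, nl)).2.Nodup ∧
    (∀ c, c ∈ (cs.foldl tlDecStep (ind, nl)).2 ↔
      c ∈ nl ∨ (0 < cs.count c ∧ (cs.count c : Int) = ind.getD c 0)) := by
  induction cs with
  | nil => intro ind nl h1 h2 h3; refine ⟨by simp, h2, by simp⟩
  | cons c0 cs ih =>
    intro ind nl h1 h2 h3
    rw [List.foldl_cons]
    set ind1 := ind.modify c0 0 (· - 1) with hind1
    have hgd1 : ∀ c, ind1.getD c 0 = if c = c0 then ind.getD c0 0 - 1 else ind.getD c 0 := by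
      intro c; rw [hind1, PySem.Dict.getD_modify]
    have hcntc0 : (c0 :: cs).count c0 = cs.count c0 + 1 := by simp [List.count_cons]
    have hcntne : ∀ c, c ≠ c0 → (c0 :: cs).count c = cs.count c := by
      intro c hc; simp [List.count_cons, hc, Ne.symm hc]
    have hc0pos : (cs.count c0 : Int) + 1 ≤ ind.getD c0 0 := by
      have := h1 c0; rw [hcntc0] at this; push_cast at this; omega
    set app : Bool := (ind1.getD c0 0 == 0) with happ
    have hstep : tlDecStep (ind, nl) c0 = (ind1, if app then nl ++ [c0] else nl) := by
      simp [tlDecStep, hind1, happ]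
    rw [hstep]
    set nl1 := if app then nl ++ [c0] else nl with hnl1
    have happ_iff : app = true ↔ ind.getD c0 0 = 1 := by
      rw [happ, beq_iff_eq, hgd1 c0]; simp; omega
    have h1' : ∀ c, (cs.count c : Int) ≤ ind1.getD c 0 := by
      intro c; have := h1 c; rw [hgd1]
      by_cases hc : c = c0
      · subst hc; rw [if_pos rfl]; omega
      · rw [if_neg hc, ← hcntne c hc]; exact this
    have hc0nl : app = true → c0 ∉ nl := by
      intro ha hmem
      rw [happ_iff] at ha
      exact h3 c0 hmem ⟨by rw [hcntc0]; omega, by rw [hcntc0, ha]; push_cast; omega⟩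
    have h2' : nl1.Nodup := by
      rw [hnl1]; cases happv : app
      · simpa using h2
      · simp only [if_true]
        refine List.Nodup.append h2 (List.nodup_singleton c0) ?_
        intro a ha hb; simp at hb; exact hc0nl happv (hb ▸ ha)
    have hmem1 : ∀ c, c ∈ nl1 ↔ (c ∈ nl ∨ (app = true ∧ c = c0)) := by
      intro c; rw [hnl1]; cases happv : app <;> simp
    have h3' : ∀ c ∈ nl1, ¬(0 < cs.count c ∧ (cs.count c : Int) = ind1.getD c 0) := by
      intro c hc hcontra
      obtain ⟨hpos, heqv⟩ := hcontra
      rw [hgd1] at heqv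
      by_cases hcc : c = c0
      · rw [if_pos hcc] at heqv
        rw [hcc] at hpos heqv
        rcases (hmem1 c).mp hc with hmem | ⟨ha, _⟩
        · rw [hcc] at hmem
          cases happv : app
          · exact h3 c0 hmem ⟨by rw [hcntc0]; omega, by rw [hcntc0]; push_cast; omega⟩
          · exact hc0nl happv hmem
        · rw [happ_iff] at ha; omega
      · rw [if_neg hcc] at heqv
        have hmem : c ∈ nl := by
          rcases (hmem1 c).mp hc with h | ⟨_, h⟩; exact h; exact absurd h hcc
        exact h3 c hmem ⟨by rw [hcntne c hcc]; omega, by rw [hcntne c hcc]; exact heqv⟩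
    obtain ⟨g1, g2, g3⟩ := ih ind1 nl1 h1' h2' h3'
    refine ⟨?_, g2, ?_⟩
    · intro c
      rw [g1 c, hgd1 c]
      by_cases hc : c = c0
      · rw [if_pos hc, hc, hcntc0]; push_cast; ring
      · rw [if_neg hc, hcntne c hc]
    · intro c
      rw [g3 c, hmem1 c, hgd1 c]
      by_cases hc : c = c0
      · rw [if_pos hc, hc, hcntc0]
        cases happv : app
        · have hv : ¬ ind.getD c0 0 = 1 := fun h => by
            rw [← happ_iff] at h; rw [happv] at h; exact Bool.false_ne_true h
          constructor
          · rintro ((h | ⟨ha, _⟩) | ⟨hp, he⟩)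
            · exact Or.inl h
            · exact absurd ha (by simp [happv])
            · exact Or.inr ⟨by omega, by push_cast; omega⟩
          · rintro (h | ⟨hp, he⟩)
            · exact Or.inl (Or.inl h)
            · push_cast at he
              exact Or.inr ⟨by omega, by omega⟩
        · rw [happ_iff] at happv
          constructor
          · intro _; exact Or.inr ⟨by omega, by push_cast; omega⟩
          · intro _; exact Or.inl (Or.inr ⟨rfl, rfl⟩)
      · rw [if_neg hc, hcntne c hc]
        simp [hc]
theorem tlFlatCount (E : List (String × String)) (layer : List String) (hnd : layer.Nodup)
    (c : String) :
    (layer.flatMap (fun p => (E.filter (fun e => e.1 == p)).map (·.2))).count c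
      = E.countP (fun e => e.2 == c && decide (e.1 ∈ layer)) := by
  induction layer with
  | nil => simp
  | cons p rest ih =>
    have hp : p ∉ rest := (List.nodup_cons.mp hnd).1
    have hrest := ih (List.nodup_cons.mp hnd).2
    rw [List.flatMap_cons, List.count_append, hrest]
    have hchunk : ((E.filter (fun e => e.1 == p)).map (·.2)).count c
        = E.countP (fun e => e.2 == c && e.1 == p) := by
      simp [List.count, List.countP_map, List.countP_filter, Function.comp_def, Bool.and_comm]
    rw [hchunk]
    rw [tlCountP_split E (fun e => e.2 == c && decide (e.1 ∈ p :: rest)) (fun e => e.1 == p)]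
    have goal1 : E.countP (fun e => (e.2 == c && decide (e.1 ∈ p :: rest)) && e.1 == p)
        = E.countP (fun e => e.2 == c && e.1 == p) := by
      apply tlCountP_congr; intro e _
      cases hb1 : (e.2 == c) <;> cases hb2 : (e.1 == p) <;> simp [hb1, hb2] <;>
        simp [beq_iff_eq] at hb2 <;> simp [hb2]
    have goal2 : E.countP (fun e => (e.2 == c && decide (e.1 ∈ p :: rest)) && !(e.1 == p))
        = E.countP (fun e => e.2 == c && decide (e.1 ∈ rest)) := by
      apply tlCountP_congr; intro e _
      cases hb1 : (e.2 == c) <;> cases hb2 : (e.1 == p) <;> simp [hb1, hb2]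
      · simp [beq_iff_eq] at hb2
        intro h; exact absurd h hb2
      · simp [beq_iff_eq] at hb2
        subst hb2; simp [hp]
    rw [goal1, goal2]

theorem tlLockstep (E : List (String × String)) (Ns : List String)
    (children : PySem.Dict String (List String)) (pitems : List (String × List String))
    (hch : ∀ p, children.getD p [] = (E.filter (fun e => e.1 == p)).map (·.2))
    (hpi : pitems = Ns.map (fun n => (n, (E.filter (fun e => e.2 == n)).map (·.1))))
    (hNnd : Ns.Nodup)
    (hNE : ∀ e ∈ E, e.1 ∈ Ns ∧ e.2 ∈ Ns) :
    ∀ (fa fb : Nat) (D : List String) (ind : PySem.Dict String Int)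
      (layer : List String) (acc : List (List String)),
      D.Nodup →
      (∀ c ∈ D, c ∈ Ns) →
      (∀ c ∈ D, ∀ p, (p, c) ∈ E → p ∈ D) →
      layer.Nodup →
      (∀ n, n ∈ layer ↔ (n ∈ Ns ∧ n ∉ D ∧ ∀ p, (p, n) ∈ E → p ∈ D)) →
      (∀ c, ind.getD c 0 = (E.countP (fun e => e.2 == c && !(decide (e.1 ∈ D))) : Int)) →
      Ns.length - D.length < fa → Ns.length - D.length < fb →
      tlLoopA fa children ind layer acc = tlLoopB fb pitems D acc := by
  intro fa
  induction fa with
  | zero => intro fb D ind layer acc _ _ _ _ _ _ hfa _; omega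
  | succ fa ih =>
    intro fb D ind layer acc hDnd hDsub hDcl hlnd hlay hind hfa hfb
    cases fb with
    | zero => omega
    | succ fb =>
    -- B's candidate list before sorting
    have hfilter : ((pitems.filter (fun np =>
          !(PySem.Set.contains D np.1) && np.2.all (fun q => PySem.Set.contains D q))).map (·.1))
        = Ns.filter (fun n => !(PySem.Set.contains D n)
            && ((E.filter (fun e => e.2 == n)).map (·.1)).all (fun q => PySem.Set.contains D q)) := by
      rw [hpi, List.filter_map, List.map_map]
      simp [Function.comp_def]
    have hqiff : ∀ n, (!(PySem.Set.contains D n)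
          && ((E.filter (fun e => e.2 == n)).map (·.1)).all (fun q => PySem.Set.contains D q)) = true
        ↔ (n ∉ D ∧ ∀ p, (p, n) ∈ E → p ∈ D) := by
      intro n
      constructor
      · intro h
        rw [Bool.and_eq_true, List.all_eq_true] at h
        obtain ⟨hc, hall⟩ := h
        have hnD : n ∉ D := by
          intro hmem
          rw [(PySem.Set.contains_iff D n).mpr hmem] at hc
          simp at hc
        refine ⟨hnD, ?_⟩
        intro p hpE
        have : p ∈ (E.filter (fun e => e.2 == n)).map (·.1) := by
          refine List.mem_map.mpr ⟨(p, n), List.mem_filter.mpr ⟨hpE, by simp⟩, rfl⟩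
        exact (PySem.Set.contains_iff D p).mp (hall p this)
      · rintro ⟨hnD, hall⟩
        rw [Bool.and_eq_true, List.all_eq_true]
        constructor
        · cases hc : PySem.Set.contains D n
          · rfl
          · exact absurd ((PySem.Set.contains_iff D n).mp hc) hnD
        · intro p hp
          obtain ⟨e, he, hep⟩ := List.mem_map.mp hp
          obtain ⟨heE, hen⟩ := List.mem_filter.mp he
          have : e = (p, n) := by
            cases e; simp at hep hen; simp [hep, hen]
          rw [this] at heE
          exact (PySem.Set.contains_iff D p).mpr (hall p heE)
    have hfnd : (Ns.filter (fun n => !(PySem.Set.contains D n)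
          && ((E.filter (fun e => e.2 == n)).map (·.1)).all (fun q => PySem.Set.contains D q))).Nodup :=
      hNnd.filter _
    have hperm : layer.Perm (Ns.filter (fun n => !(PySem.Set.contains D n)
          && ((E.filter (fun e => e.2 == n)).map (·.1)).all (fun q => PySem.Set.contains D q))) := by
      refine (List.perm_ext_iff_of_nodup hlnd hfnd).mpr ?_
      intro n
      rw [hlay n, List.mem_filter, hqiff n]
    have hsorted_eq : PySem.List.sorted layer (fun x => x) false
        = PySem.List.sorted (Ns.filter (fun n => !(PySem.Set.contains D n)
            && ((E.filter (fun e => e.2 == n)).map (·.1)).all (fun q => PySem.Set.contains D q)))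
            (fun x => x) false :=
      PySem.List.sorted_eq_sorted_of_perm _ _ _ (fun a b h => h) hperm
    rw [tlLoopA, tlLoopB, hfilter, ← hsorted_eq]
    by_cases hempty : layer = []
    · have h2 : PySem.List.sorted layer (fun x => x) false = [] := by
        rw [hempty]; exact (PySem.List.sorted_eq_nil_iff _ _ _).mpr rfl
      rw [h2, hempty]
      simp
    · -- nonempty round
      have hAne : ¬ (layer.isEmpty = true) := by simp [hempty]
      have hLperm : (PySem.List.sorted layer (fun x => x) false).Perm layer :=
        PySem.List.sorted_perm layer (fun x => x) false
      have hBne : ¬ ((PySem.List.sorted layer (fun x => x) false).isEmpty = true) := by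
        simp only [List.isEmpty_iff, PySem.List.sorted_eq_nil_iff]
        exact hempty
      rw [if_neg hAne, if_neg hBne]
      set L := PySem.List.sorted layer (fun x => x) false with hL
      have hmemL : ∀ c, c ∈ L ↔ c ∈ layer := fun c => PySem.List.mem_sorted layer (fun x => x) false c
      have hLnd : L.Nodup := (hLperm.nodup_iff).mpr hlnd
      show tlLoopA fa children
          (layer.foldl (fun st node => (children.getD node []).foldl tlDecStep st) (ind, [])).1
          (layer.foldl (fun st node => (children.getD node []).foldl tlDecStep st) (ind, [])).2
          (acc ++ [L])
        = tlLoopB fb pitems (PySem.Set.update D L) (acc ++ [L])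
      have hfold : layer.foldl (fun st node => (children.getD node []).foldl tlDecStep st) (ind, [])
          = (layer.flatMap (fun node => (E.filter (fun e => e.1 == node)).map (·.2))).foldl
              tlDecStep (ind, []) := by
        simp only [hch]
        rw [List.foldl_flatMap]
      rw [hfold]
      set cs := layer.flatMap (fun node => (E.filter (fun e => e.1 == node)).map (·.2)) with hcs
      have hcnt : ∀ c, cs.count c = E.countP (fun e => e.2 == c && decide (e.1 ∈ layer)) :=
        tlFlatCount E layer hlnd
      have hlayND : ∀ n ∈ layer, n ∉ D := fun n hn => ((hlay n).mp hn).2.1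
      have h1 : ∀ c, (cs.count c : Int) ≤ ind.getD c 0 := by
        intro c
        rw [hcnt c, hind c]
        have hm : ∀ e ∈ E, (e.2 == c && decide (e.1 ∈ layer)) = true →
            (e.2 == c && !(decide (e.1 ∈ D))) = true := by
          intro e _ h
          rw [Bool.and_eq_true] at h ⊢
          refine ⟨h.1, ?_⟩
          have : e.1 ∈ layer := of_decide_eq_true h.2
          simp [hlayND e.1 this]
        exact_mod_cast List.countP_mono_left hm
      obtain ⟨g1, g2, g3⟩ := tlDecFold cs ind [] h1 List.nodup_nil (by simp)
      -- characterisation of the next layer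
      have hnext : ∀ c, (0 < cs.count c ∧ (cs.count c : Int) = ind.getD c 0)
          ↔ (c ∈ Ns ∧ ¬(c ∈ D ∨ c ∈ layer) ∧ ∀ p, (p, c) ∈ E → (p ∈ D ∨ p ∈ layer)) := by
        intro c
        rw [hcnt c, hind c]
        constructor
        · rintro ⟨hpos, heq⟩
          obtain ⟨e0, he0E, he0⟩ := List.countP_pos_iff.mp hpos
          rw [Bool.and_eq_true] at he0
          have he0c : e0.2 = c := by simpa using he0.1
          have he0l : e0.1 ∈ layer := of_decide_eq_true he0.2
          have hp0E : (e0.1, c) ∈ E := by rw [← he0c]; exact he0E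
          have heqN : E.countP (fun e => e.2 == c && !(decide (e.1 ∈ D)))
              = E.countP (fun e => e.2 == c && decide (e.1 ∈ layer)) := by
            exact_mod_cast heq.symm
          have hrev := tlCountP_eq_imp E (fun e => e.2 == c && decide (e.1 ∈ layer))
            (fun e => e.2 == c && !(decide (e.1 ∈ D))) (by
              intro e _ h
              rw [Bool.and_eq_true] at h ⊢
              exact ⟨h.1, by simp [hlayND e.1 (of_decide_eq_true h.2)]⟩) heqN
          have hpar : ∀ p, (p, c) ∈ E → (p ∈ D ∨ p ∈ layer) := by
            intro p hpE
            by_cases hpD : p ∈ D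
            · exact Or.inl hpD
            · right
              have := hrev (p, c) hpE (by simp [hpD])
              rw [Bool.and_eq_true] at this
              exact of_decide_eq_true this.2
          have hcNs : c ∈ Ns := he0c ▸ (hNE e0 he0E).2
          have hnDL : ¬(c ∈ D ∨ c ∈ layer) := by
            rintro (hD | hLm)
            · exact hlayND e0.1 he0l (hDcl c hD e0.1 hp0E)
            · exact hlayND e0.1 he0l (((hlay c).mp hLm).2.2 e0.1 hp0E)
          exact ⟨hcNs, hnDL, hpar⟩
        · rintro ⟨hNs, hnDL, hpar⟩
          have hnD : c ∉ D := fun h => hnDL (Or.inl h)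
          have hnL : c ∉ layer := fun h => hnDL (Or.inr h)
          have hex : ∃ p0, p0 ∈ layer ∧ (p0, c) ∈ E := by
            by_contra hno
            push_neg at hno
            have hallD : ∀ p, (p, c) ∈ E → p ∈ D := by
              intro p hp
              rcases hpar p hp with h | h
              · exact h
              · exact (hno p h hp).elim
            exact hnL ((hlay c).mpr ⟨hNs, hnD, hallD⟩)
          obtain ⟨p0, hp0l, hp0E⟩ := hex
          constructor
          · refine List.countP_pos_iff.mpr ⟨(p0, c), hp0E, ?_⟩
            simp [hp0l]
          · have : E.countP (fun e => e.2 == c && decide (e.1 ∈ layer))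
                = E.countP (fun e => e.2 == c && !(decide (e.1 ∈ D))) := by
              apply tlCountP_congr
              intro e heE
              by_cases hec : e.2 = c
              · have heE' : (e.1, c) ∈ E := by
                  rw [← hec]; exact heE
                rcases hpar e.1 heE' with h | h
                · have hnl : e.1 ∉ layer := fun hc => hlayND e.1 hc h
                  simp [beq_iff_eq, hec, h, hnl]
                · have hnd : e.1 ∉ D := hlayND e.1 h
                  simp [beq_iff_eq, hec, h, hnd]
              · have h1 : (e.2 == c) = false := by simp [beq_iff_eq, hec]
                simp [h1]
            exact_mod_cast congrArg Nat.cast this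
      have hmemD' : ∀ c, c ∈ PySem.Set.update D L ↔ (c ∈ D ∨ c ∈ layer) := by
        intro c
        rw [PySem.Set.mem_update]
        exact or_congr_right (hmemL c)
      have hD'nd : (PySem.Set.update D L).Nodup := PySem.Set.nodup_update D L hDnd
      have hD'sub : ∀ c ∈ PySem.Set.update D L, c ∈ Ns := by
        intro c hc
        rcases (hmemD' c).mp hc with h | h
        · exact hDsub c h
        · exact ((hlay c).mp h).1
      have hD'cl : ∀ c ∈ PySem.Set.update D L, ∀ p, (p, c) ∈ E → p ∈ PySem.Set.update D L := by
        intro c hc p hpE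
        rcases (hmemD' c).mp hc with h | h
        · exact (hmemD' p).mpr (Or.inl (hDcl c h p hpE))
        · exact (hmemD' p).mpr (Or.inl (((hlay c).mp h).2.2 p hpE))
      have hlay' : ∀ n, n ∈ (cs.foldl tlDecStep (ind, [])).2 ↔
          (n ∈ Ns ∧ n ∉ PySem.Set.update D L ∧ ∀ p, (p, n) ∈ E → p ∈ PySem.Set.update D L) := by
        intro n
        rw [g3 n]
        simp only [List.not_mem_nil, false_or]
        rw [hnext n]
        constructor
        · rintro ⟨h1, h2, h3⟩
          exact ⟨h1, fun hc => h2 ((hmemD' n).mp hc), fun p hp => (hmemD' p).mpr (h3 p hp)⟩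
        · rintro ⟨h1, h2, h3⟩
          exact ⟨h1, fun hc => h2 ((hmemD' n).mpr hc), fun p hp => (hmemD' p).mp (h3 p hp)⟩
      have hind' : ∀ c, (cs.foldl tlDecStep (ind, [])).1.getD c 0
          = (E.countP (fun e => e.2 == c && !(decide (e.1 ∈ PySem.Set.update D L))) : Int) := by
        intro c
        rw [g1 c, hind c, hcnt c]
        have hsplit := tlCountP_split E (fun e => e.2 == c && !(decide (e.1 ∈ D)))
          (fun e => decide (e.1 ∈ layer))
        have hq1 : E.countP (fun e => (e.2 == c && !(decide (e.1 ∈ D))) && decide (e.1 ∈ layer))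
            = E.countP (fun e => e.2 == c && decide (e.1 ∈ layer)) := by
          apply tlCountP_congr; intro e _
          by_cases hl : e.1 ∈ layer
          · simp [hl, hlayND e.1 hl]
          · simp [hl]
        have hq2 : E.countP (fun e => (e.2 == c && !(decide (e.1 ∈ D))) && !(decide (e.1 ∈ layer)))
            = E.countP (fun e => e.2 == c && !(decide (e.1 ∈ PySem.Set.update D L))) := by
          apply tlCountP_congr; intro e _
          by_cases hd : e.1 ∈ D
          · have hm : e.1 ∈ PySem.Set.update D L := (hmemD' e.1).mpr (Or.inl hd)
            simp [hd, hm]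
          · by_cases hl : e.1 ∈ layer
            · have hm : e.1 ∈ PySem.Set.update D L := (hmemD' e.1).mpr (Or.inr hl)
              simp [hd, hl, hm]
            · have hm : e.1 ∉ PySem.Set.update D L := fun hc => by
                rcases (hmemD' e.1).mp hc with h | h
                · exact hd h
                · exact hl h
              simp [hd, hl, hm]
        omega
      have hlenL : L.length = layer.length := hLperm.length_eq
      have hlpos : 1 ≤ layer.length := List.length_pos_of_ne_nil hempty
      have hdisj : ∀ x ∈ L, x ∉ D := fun x hx => hlayND x ((hmemL x).mp hx)
      have hD'eq : PySem.Set.update D L = D ++ L :=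
        PySem.Set.update_eq_append_of_disjoint D L hLnd hdisj
      have hD'len : (PySem.Set.update D L).length = D.length + L.length := by
        rw [hD'eq]; simp
      have hD'le : (PySem.Set.update D L).length ≤ Ns.length :=
        tlLength_le_of_nodup_subset _ _ hD'nd (fun c hc => hD'sub c hc)
      exact ih fb (PySem.Set.update D L) ((cs.foldl tlDecStep (ind, [])).1)
        ((cs.foldl tlDecStep (ind, [])).2) (acc ++ [L]) hD'nd hD'sub hD'cl g2 hlay' hind'
        (by omega) (by omega)

theorem tl_main (graph : List (String × List String)) :
    topological_levels graph = topological_levels_alt graph := by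
  show tlLoopA (((PySem.Dict.ofList graph).items.flatMap (fun pu => pu.1 :: pu.2)).length + 1)
      (tlBuildA (PySem.Dict.ofList graph).items).2 (tlBuildA (PySem.Dict.ofList graph).items).1
      (((PySem.Dict.ofList graph).items.map (·.1)).filter
        (fun n => (tlBuildA (PySem.Dict.ofList graph).items).1.getD n 0 == 0)) []
    = tlLoopB ((tlParentsDict (PySem.Dict.ofList graph).items).size + 1)
      (tlParentsDict (PySem.Dict.ofList graph).items).items PySem.Set.empty []
  set g := (PySem.Dict.ofList graph).items with hg
  set E := tlE g with hE
  set Ns := PySem.Set.ofList (tlFlat g) with hNs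
  have hkeys : (PySem.Dict.ofList graph).keys = g.map (·.1) := by
    rw [hg]; rfl
  have hknd : (g.map (·.1)).Nodup := by
    rw [← hkeys]; exact PySem.Dict.nodup_keys_ofList graph
  have hkeysub : ∀ n ∈ g.map (·.1), n ∈ Ns := by
    intro n hn
    obtain ⟨pu, hpu, hpn⟩ := List.mem_map.mp hn
    refine (PySem.Set.mem_ofList _ _).mpr ?_
    exact List.mem_flatMap.mpr ⟨pu, hpu, by rw [← hpn]; exact List.mem_cons_self⟩
  have hNE : ∀ e ∈ E, e.1 ∈ Ns ∧ e.2 ∈ Ns := by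
    intro e he
    obtain ⟨pu, hpu, hme⟩ := List.mem_flatMap.mp he
    obtain ⟨c, hc, hce⟩ := List.mem_map.mp hme
    have h1 : e.1 = pu.1 := by rw [← hce]
    have h2 : e.2 = c := by rw [← hce]
    constructor
    · rw [h1]; exact hkeysub pu.1 (List.mem_map.mpr ⟨pu, hpu, rfl⟩)
    · rw [h2]
      refine (PySem.Set.mem_ofList _ _).mpr ?_
      exact List.mem_flatMap.mpr ⟨pu, hpu, List.mem_cons_of_mem _ hc⟩
  have hparitems : (tlParentsDict g).items
      = Ns.map (fun n => (n, (E.filter (fun e => e.2 == n)).map (·.1))) := by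
    rw [PySem.Dict.items_eq_map_keys (tlParentsDict g)
      (by rw [tlParents_keys]; exact PySem.Set.nodup_ofList _) []]
    rw [tlParents_keys g]
    exact List.map_congr_left (fun n _ => by rw [tlParents_getD g n])
  have hsize : (tlParentsDict g).size = Ns.length := by
    have : (tlParentsDict g).size = (tlParentsDict g).items.length := rfl
    rw [this, hparitems, List.length_map]
  rw [hsize]
  refine tlLockstep E Ns (tlBuildA g).2 (tlParentsDict g).items
    (fun p => tlBuildA_children g p) hparitems (PySem.Set.nodup_ofList _) hNE
    ((tlFlat g).length + 1) (Ns.length + 1) [] (tlBuildA g).1 _ [] List.nodup_nil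
    (by simp) (by simp) (hknd.filter _) ?_ ?_ ?_ ?_
  · -- initial layer characterisation
    intro n
    rw [List.mem_filter]
    have hz : ((tlBuildA g).1.getD n 0 == 0) = true ↔ (∀ p, (p, n) ∈ E → False) := by
      rw [beq_iff_eq, tlBuildA_ind g n]
      have : ((E.countP (fun e => e.2 == n) : Int) = 0) ↔ E.countP (fun e => e.2 == n) = 0 := by
        omega
      rw [this, List.countP_eq_zero]
      constructor
      · intro h p hp
        have := h (p, n) hp
        simp at this
      · intro h e he
        cases e with
        | mk p c =>
          simp only [beq_iff_eq]
          intro hc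
          exact (h p (by rw [← hc]; exact he)).elim
    constructor
    · rintro ⟨hk, hval⟩
      exact ⟨hkeysub n hk, by simp, fun p hp => ((hz.mp hval) p hp).elim⟩
    · rintro ⟨hNsm, _, hall⟩
      have hnoin : ∀ p, (p, n) ∈ E → False := fun p hp => (List.not_mem_nil (hall p hp))
      refine ⟨?_, hz.mpr hnoin⟩
      obtain ⟨pu, hpu, hm⟩ := List.mem_flatMap.mp ((PySem.Set.mem_ofList _ _).mp hNsm)
      rcases List.mem_cons.mp hm with h | h
      · exact List.mem_map.mpr ⟨pu, hpu, h.symm⟩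
      · exact (hnoin pu.1 (List.mem_flatMap.mpr ⟨pu, hpu, List.mem_map.mpr ⟨n, h, rfl⟩⟩)).elim
  · -- initial in-degree characterisation
    intro c
    rw [tlBuildA_ind g c]
    congr 1
    apply tlCountP_congr
    intro e _
    simp
  · -- fuel A
    have := PySem.Set.length_ofList_le (tlFlat g)
    rw [← hNs] at this
    simp only [List.length_nil, Nat.sub_zero]
    omega
  · -- fuel B
    simp only [List.length_nil, Nat.sub_zero]
    omega

-- ===== VERDICT (by name: the statement is the Claim_ definition above) =====
theorem topological_levels_spec : Claim_equal_topological_levels := by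
  intro graph _
  unfold Spec_topological_levels
  exact tl_main graph
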